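-- pv_equiv track=rewrite | github.com/Qiguanyi/Coursera-Data-Structures-and-Algorithms-Specialization | Part IV - Algorithms on Strings/week1_Programming-Assignment-1/non_shared_substring/non_shared_substring.py | solve
-- ===== SOURCE A (Python) =====
-- def solve (p, q):
--     p_len = len(p)
--     q_len = len(q)
--     for i in range(min(p_len, q_len)):
--         for j in range(p_len - i):
--             substring = p[j: j+i+1]
--             if substring not in q:
--                 return substring
--     return
-- ===== SOURCE B (Python) =====
-- def solve(p, q):
--     m = min(len(p), len(q))
--     if m == 0:
--         return None
--
--     def first_absent(L):
--         # leftmost window of p of length L that is not a window of q (else None)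
--         shared = set()
--         for a in range(len(q) - L + 1):
--             shared.add(q[a:a+L])
--         for j in range(len(p) - L + 1):
--             w = p[j:j+L]
--             if w not in shared:
--                 return w
--         return None
--
--     # gallop: grow hi until some length-hi window is absent (or hi reaches m)
--     lo, hi = 1, 1
--     while hi < m and first_absent(hi) is None:
--         lo, hi = hi + 1, min(2 * hi, m)
--     if first_absent(hi) is None:
--         return None
--     # binary search for the minimal such length in [lo, hi]
--     while lo < hi:
--         mid = (lo + hi) // 2
--         if first_absent(mid) is None:
--             lo = mid + 1
--         else:
--             hi = mid
--     return first_absent(hi)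
-- ===== Notes on version B (the rewrite author's own statement) =====
-- stated objective: faster
-- what changed: Replaces A's nested scan (every length times every start, each probed by a linear 'substring in q' search) with a per-length hash set of q's windows plus a gallop-then-binary search on the answer length, which is valid because absence of a window of p from q is monotone in the window length.
import Mathlib
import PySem

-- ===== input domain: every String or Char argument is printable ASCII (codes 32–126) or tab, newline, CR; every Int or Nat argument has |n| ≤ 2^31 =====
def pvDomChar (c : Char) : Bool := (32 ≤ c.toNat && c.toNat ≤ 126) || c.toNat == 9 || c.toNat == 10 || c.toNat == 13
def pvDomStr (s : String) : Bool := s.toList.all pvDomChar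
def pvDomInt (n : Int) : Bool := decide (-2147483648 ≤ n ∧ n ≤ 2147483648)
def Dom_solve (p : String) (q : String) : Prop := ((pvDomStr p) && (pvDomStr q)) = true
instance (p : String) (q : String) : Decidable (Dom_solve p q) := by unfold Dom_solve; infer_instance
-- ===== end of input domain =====

-- B replaces A's nested scan (every length × every start, each probed by a linear
-- 'substring in q' search) with a per-length hash set of q's windows plus a
-- gallop-then-binary search on the answer length (valid because absence of a
-- window is monotone in the length).

-- ===== PORT A =====
def solve (p : String) (q : String) : Option String :=
  let pl := p.toList
  let ql := q.toList
  let p_len : Int := pl.length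
  let q_len : Int := ql.length
  ((PySem.List.pyRange 0 (min p_len q_len) 1).findSome? (fun i =>
    (PySem.List.pyRange 0 (p_len - i) 1).findSome? (fun j =>
      let substring := PySem.List.slice pl (some j) (some (j + i + 1))
      if PySem.Chars.isIn substring ql then none else some substring))).map String.ofList

-- ===== PORT B =====
-- Source B's first_absent(L): leftmost window of p of length L absent from the set of q's windows
def firstAbsent (pl ql : List Char) (L : Int) : Option (List Char) :=
  let shared : PySem.Set (List Char) :=
    (PySem.List.pyRange 0 ((ql.length : Int) - L + 1) 1).foldl
      (fun s a => PySem.Set.add s (PySem.List.slice ql (some a) (some (a + L)))) PySem.Set.empty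
  (PySem.List.pyRange 0 ((pl.length : Int) - L + 1) 1).findSome? (fun j =>
    let w := PySem.List.slice pl (some j) (some (j + L))
    if PySem.Set.contains shared w then none else some w)

-- Source B's gallop loop (fuel makes the while-loop total; with enough fuel it reaches the exit condition)
def gallop (pl ql : List Char) (m : Int) : Nat → Int × Int → Int × Int
  | 0, st => st
  | fuel + 1, (lo, hi) =>
    if hi < m ∧ firstAbsent pl ql hi = none then
      gallop pl ql m fuel (hi + 1, min (2 * hi) m)
    else (lo, hi)

-- Source B's binary-search loop
def bsearch (pl ql : List Char) : Nat → Int → Int → Int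
  | 0, _, hi => hi
  | fuel + 1, lo, hi =>
    if lo < hi then
      let mid := PySem.Int.floordiv (lo + hi) 2
      if firstAbsent pl ql mid = none then bsearch pl ql fuel (mid + 1) hi
      else bsearch pl ql fuel lo mid
    else hi

def solve_alt (p : String) (q : String) : Option String :=
  let pl := p.toList
  let ql := q.toList
  let m : Int := min (pl.length : Int) (ql.length : Int)
  if m = 0 then none
  else
    let r := gallop pl ql m m.toNat (1, 1)
    if firstAbsent pl ql r.2 = none then none
    else (firstAbsent pl ql (bsearch pl ql (r.2 - r.1).toNat r.1 r.2)).map String.ofList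

-- ===== PRECONDITION & SPEC =====
def Spec_solve (p : String) (q : String) (out : Option String) : Prop := out = solve_alt p q
instance (p : String) (q : String) (out : Option String) : Decidable (Spec_solve p q out) := by unfold Spec_solve; infer_instance

-- ===== CLAIM (what is proved, stated in full; the proofs are below) =====
def Claim_equal_solve : Prop := ∀ (p : String) (q : String), Dom_solve p q → Spec_solve p q (solve p q)

-- ===== LEMMAS AND PROOFS =====

lemma pv_window_length (pl : List Char) (j L : ℕ) (h : j + L ≤ pl.length) :
    ((pl.drop j).take L).length = L := by
  simp [List.length_take, List.length_drop]; omega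

lemma pv_infix_iff_window (ql : List Char) (L : ℕ) (w : List Char) (hw : w.length = L) :
    w <:+: ql ↔ ∃ a : ℕ, a + L ≤ ql.length ∧ (ql.drop a).take L = w := by
  constructor
  · rintro ⟨s, t, hst⟩
    refine ⟨s.length, ?_, ?_⟩
    · have := congrArg List.length hst
      simp [List.length_append] at this
      omega
    · have hd : ql.drop s.length = w ++ t := by
        rw [← hst, List.append_assoc, List.drop_left]
      rw [hd, List.take_left' hw]
  · rintro ⟨a, ha, hwin⟩
    rw [← hwin]
    exact ((List.take_prefix _ _).isInfix).trans ((List.drop_suffix _ _).isInfix)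

lemma pv_window_infix (pl : List Char) (a c La Lc : ℕ) (h1 : a ≤ c) (h2 : c + Lc ≤ a + La) :
    (pl.drop c).take Lc <:+: (pl.drop a).take La := by
  have key : (pl.drop c).take Lc = (((pl.drop a).take La).drop (c - a)).take Lc := by
    rw [List.drop_take, List.drop_drop, List.take_take]
    have h3 : a + (c - a) = c := by omega
    have h4 : min Lc (La - (c - a)) = Lc := by omega
    rw [h3, h4]
  rw [key]
  exact ((List.take_prefix _ _).isInfix).trans ((List.drop_suffix _ _).isInfix)

lemma pv_shared_iff (ql : List Char) (L : ℕ) (w : List Char) (hw : w.length = L) :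
    PySem.Set.contains
      ((PySem.List.pyRange 0 ((ql.length : Int) - (L : Int) + 1) 1).foldl
        (fun s a => PySem.Set.add s (PySem.List.slice ql (some a) (some (a + (L : Int)))))
        PySem.Set.empty) w = true ↔ w <:+: ql := by
  have hfold : (PySem.List.pyRange 0 ((ql.length : Int) - (L : Int) + 1) 1).foldl
        (fun s a => PySem.Set.add s (PySem.List.slice ql (some a) (some (a + (L : Int)))))
        PySem.Set.empty
      = PySem.Set.ofList ((PySem.List.pyRange 0 ((ql.length : Int) - (L : Int) + 1) 1).map
          (fun a => PySem.List.slice ql (some a) (some (a + (L : Int))))) := by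
    rw [PySem.Set.ofList_eq_foldl, List.foldl_map]
    rfl
  rw [hfold, PySem.Set.contains_iff, PySem.Set.mem_ofList, List.mem_map]
  rw [pv_infix_iff_window ql L w hw]
  constructor
  · rintro ⟨a, ha, hsl⟩
    rw [PySem.List.mem_pyRange_one] at ha
    obtain ⟨ha0, ha1⟩ := ha
    refine ⟨a.toNat, by omega, ?_⟩
    have hc : a = ((a.toNat : ℕ) : Int) := by omega
    rw [hc, PySem.List.slice_natCast_add] at hsl
    exact hsl
  · rintro ⟨a, ha, hwin⟩
    refine ⟨(a : Int), ?_, ?_⟩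
    · rw [PySem.List.mem_pyRange_one]; omega
    · rw [PySem.List.slice_natCast_add]; exact hwin

lemma pv_firstAbsent_none_iff (pl ql : List Char) (L : ℕ) :
    firstAbsent pl ql (L : Int) = none ↔
      ∀ j : ℕ, j + L ≤ pl.length → (pl.drop j).take L <:+: ql := by
  unfold firstAbsent
  rw [List.findSome?_eq_none_iff]
  constructor
  · intro h j hj
    have hmem : ((j : ℕ) : Int) ∈ PySem.List.pyRange 0 ((pl.length : Int) - (L : Int) + 1) 1 := by
      rw [PySem.List.mem_pyRange_one]; omega
    have := h _ hmem
    simp only [PySem.List.slice_natCast_add] at this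
    split at this
    · rename_i hc
      rw [pv_shared_iff ql L _ (pv_window_length pl j L hj)] at hc
      exact hc
    · simp at this
  · intro h j hjmem
    rw [PySem.List.mem_pyRange_one] at hjmem
    obtain ⟨hj0, hj1⟩ := hjmem
    have hc : j = ((j.toNat : ℕ) : Int) := by omega
    rw [hc, PySem.List.slice_natCast_add]
    have hle : j.toNat + L ≤ pl.length := by omega
    have := h j.toNat hle
    rw [← pv_shared_iff ql L _ (pv_window_length pl j.toNat L hle)] at this
    simp only [PySem.Set.empty] at this
    simp
    exact (PySem.Set.contains_iff _ _).mp this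

lemma pv_findSome?_congr {α β : Type} (l : List α) (f g : α → Option β)
    (h : ∀ x ∈ l, f x = g x) : l.findSome? f = l.findSome? g := by
  induction l with
  | nil => rfl
  | cons a as ih =>
    simp only [List.findSome?_cons]
    rw [h a (by simp)]
    cases g a with
    | some b => rfl
    | none => exact ih (fun x hx => h x (by simp [hx]))

lemma pv_findSome?_pyRange_min {α : Type} (g : Int → Option α) (a b i0 : Int)
    (ha : a ≤ i0) (hb : i0 < b)
    (hnone : ∀ i, a ≤ i → i < i0 → g i = none) (hsome : g i0 ≠ none) :
    (PySem.List.pyRange a b 1).findSome? g = g i0 := by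
  generalize hn : (i0 - a).toNat = n at *
  induction n generalizing a with
  | zero =>
    have haa : a = i0 := by omega
    subst haa
    rw [PySem.List.pyRange_one_cons (by omega), List.findSome?_cons]
    cases hg : g a with
    | some v => rfl
    | none => exact absurd hg hsome
  | succ n ih =>
    rw [PySem.List.pyRange_one_cons (by omega), List.findSome?_cons]
    have hga : g a = none := hnone a le_rfl (by omega)
    rw [hga]
    exact ih (a + 1) (by omega) (fun i h1 h2 => hnone i (by omega) h2) (by omega)

lemma pv_bridge (pl ql : List Char) (i : Int) (h0 : 0 ≤ i) :
    (PySem.List.pyRange 0 ((pl.length : Int) - i) 1).findSome? (fun j =>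
      if PySem.Chars.isIn (PySem.List.slice pl (some j) (some (j + i + 1))) ql then none
      else some (PySem.List.slice pl (some j) (some (j + i + 1)))) =
    firstAbsent pl ql (i + 1) := by
  simp only [firstAbsent]
  have hb : (pl.length : Int) - (i + 1) + 1 = (pl.length : Int) - i := by ring
  rw [hb]
  apply pv_findSome?_congr
  intro j hj
  rw [PySem.List.mem_pyRange_one] at hj
  have hassoc : j + i + 1 = j + (i + 1) := by ring
  rw [hassoc]
  have hL : i + 1 = (((i + 1).toNat : ℕ) : Int) := by omega
  have hjc : j = ((j.toNat : ℕ) : Int) := by omega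
  rw [hL, hjc, PySem.List.slice_natCast_add]
  have hlen : j.toNat + (i + 1).toNat ≤ pl.length := by omega
  have hwl := pv_window_length pl j.toNat (i + 1).toNat hlen
  by_cases hinf : (pl.drop j.toNat).take (i + 1).toNat <:+: ql
  · rw [if_pos ((PySem.Chars.isIn_iff_infix _ _).mpr hinf),
      if_pos ((pv_shared_iff ql (i + 1).toNat _ hwl).mpr hinf)]
  · rw [if_neg (fun h => hinf ((PySem.Chars.isIn_iff_infix _ _).mp h)),
      if_neg (fun h => hinf ((pv_shared_iff ql (i + 1).toNat _ hwl).mp h))]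

lemma pv_mono (pl ql : List Char) (L : ℕ)
    (hM : L + 1 ≤ min pl.length ql.length)
    (h : firstAbsent pl ql (L : Int) ≠ none) :
    firstAbsent pl ql (((L + 1 : ℕ) : ℕ) : Int) ≠ none := by
  intro hnone
  rw [pv_firstAbsent_none_iff] at hnone
  apply h
  rw [pv_firstAbsent_none_iff]
  intro j hj
  by_contra habs
  set j' : ℕ := min j (pl.length - (L + 1)) with hj'
  have hle : j' + (L + 1) ≤ pl.length := by omega
  have hwin := pv_window_infix pl j' j (L + 1) L (by omega) (by omega)
  exact habs (hwin.trans (hnone j' hle))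

lemma pv_mono_ge (pl ql : List Char) (a b : ℕ) (h1 : 1 ≤ a) (hab : a ≤ b)
    (hbM : b ≤ min pl.length ql.length)
    (h : firstAbsent pl ql (a : Int) ≠ none) :
    firstAbsent pl ql (b : Int) ≠ none := by
  induction b with
  | zero => omega
  | succ n ih =>
    rcases Nat.lt_or_ge n a with hn | hn
    · have : a = n + 1 := by omega
      subst this; exact h
    · exact pv_mono pl ql n (by omega) (ih (by omega) (by omega))

lemma pv_mono_ge_int (pl ql : List Char) (a b : Int) (h1 : 1 ≤ a) (hab : a ≤ b)
    (hbM : b ≤ min (pl.length : Int) (ql.length : Int))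
    (h : firstAbsent pl ql a ≠ none) :
    firstAbsent pl ql b ≠ none := by
  have ha : a = ((a.toNat : ℕ) : Int) := by omega
  have hb : b = ((b.toNat : ℕ) : Int) := by omega
  rw [hb]
  rw [ha] at h
  exact pv_mono_ge pl ql a.toNat b.toNat (by omega) (by omega) (by omega) h

lemma pv_gallop_spec (pl ql : List Char) (fuel : ℕ) :
    ∀ (lo hi : Int),
    1 ≤ lo → lo ≤ hi → hi ≤ min (pl.length : Int) (ql.length : Int) →
    (∀ k : Int, 1 ≤ k → k < lo → firstAbsent pl ql k = none) →
    ((min (pl.length : Int) (ql.length : Int) - hi).toNat < fuel) →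
    (1 ≤ (gallop pl ql (min (pl.length : Int) (ql.length : Int)) fuel (lo, hi)).1 ∧
     (gallop pl ql (min (pl.length : Int) (ql.length : Int)) fuel (lo, hi)).1 ≤
       (gallop pl ql (min (pl.length : Int) (ql.length : Int)) fuel (lo, hi)).2 ∧
     (gallop pl ql (min (pl.length : Int) (ql.length : Int)) fuel (lo, hi)).2 ≤
       min (pl.length : Int) (ql.length : Int) ∧
     (∀ k : Int, 1 ≤ k → k < (gallop pl ql (min (pl.length : Int) (ql.length : Int)) fuel (lo, hi)).1 →
       firstAbsent pl ql k = none) ∧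
     ¬((gallop pl ql (min (pl.length : Int) (ql.length : Int)) fuel (lo, hi)).2 <
         min (pl.length : Int) (ql.length : Int) ∧
       firstAbsent pl ql (gallop pl ql (min (pl.length : Int) (ql.length : Int)) fuel (lo, hi)).2 = none)) := by
  set m : Int := min (pl.length : Int) (ql.length : Int) with hm
  induction fuel with
  | zero => intro lo hi _ _ _ _ hf; omega
  | succ n ih =>
    intro lo hi hlo hlohi hhim hbelow hf
    rw [gallop]
    by_cases hc : hi < m ∧ firstAbsent pl ql hi = none
    · rw [if_pos hc]
      have hhi1 : 1 ≤ hi := le_trans hlo hlohi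
      apply ih (hi + 1) (min (2 * hi) m) (by omega) (by omega) (by omega)
      · intro k hk1 hk2
        by_contra hne
        exact (pv_mono_ge_int pl ql k hi hk1 (by omega) (by omega) hne) hc.2
      · omega
    · rw [if_neg hc]
      exact ⟨hlo, hlohi, hhim, hbelow, hc⟩

lemma pv_bsearch_spec (pl ql : List Char) (L0 : Int)
    (hL01 : 1 ≤ L0)
    (hL0s : firstAbsent pl ql L0 ≠ none)
    (hmin : ∀ k : Int, 1 ≤ k → k < L0 → firstAbsent pl ql k = none) (fuel : ℕ) :
    ∀ (lo hi : Int), 1 ≤ lo → lo ≤ hi → hi ≤ min (pl.length : Int) (ql.length : Int) →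
    (hi - lo).toNat ≤ fuel → lo ≤ L0 → L0 ≤ hi →
    bsearch pl ql fuel lo hi = L0 := by
  induction fuel with
  | zero =>
    intro lo hi h1 h2 h3 hf h4 h5
    rw [bsearch]
    omega
  | succ n ih =>
    intro lo hi h1 h2 h3 hf h4 h5
    rw [bsearch]
    by_cases hlh : lo < hi
    · rw [if_pos hlh]
      obtain ⟨hm1, hm2⟩ := PySem.Int.floordiv_two_mid_bounds (le_of_lt hlh)
      have hmlt : PySem.Int.floordiv (lo + hi) 2 < hi := by
        rw [PySem.Int.floordiv_lt_iff_lt_mul (by omega)]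
        omega
      set mid := PySem.Int.floordiv (lo + hi) 2 with hmid
      by_cases hcm : firstAbsent pl ql mid = none
      · rw [if_pos hcm]
        have hgt : L0 > mid := by
          by_contra hle
          exact (pv_mono_ge_int pl ql L0 mid hL01 (by omega) (by omega) hL0s) hcm
        exact ih (mid + 1) hi (by omega) (by omega) h3 (by omega) (by omega) (by omega)
      · rw [if_neg hcm]
        have hle : L0 ≤ mid := by
          by_contra hgt
          exact hcm (hmin mid (by omega) (by omega))
        exact ih lo mid h1 (by omega) (by omega) (by omega) h4 hle
    · rw [if_neg hlh]
      omega



lemma pv_main (p q : String) : solve p q = solve_alt p q := by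
  simp only [solve, solve_alt]
  set pl := p.toList with hpl
  set ql := q.toList with hql
  set m : Int := min (pl.length : Int) (ql.length : Int) with hm
  by_cases hm0 : m = 0
  · rw [if_pos hm0, hm0]
    simp [PySem.List.pyRange_one_eq_nil]
  · rw [if_neg hm0]
    have hmpos : 1 ≤ m := by omega
    by_cases hex : ∃ L : ℕ, 1 ≤ L ∧ (L : Int) ≤ m ∧ firstAbsent pl ql (L : Int) ≠ none
    -- some non-shared substring exists: both sides return the one at the minimal length L0
    · have hL0spec := Nat.find_spec hex
      set L0 := Nat.find hex with hL0def
      obtain ⟨hL01, hL0m, hL0s⟩ := hL0spec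
      have hminInt : ∀ k : Int, 1 ≤ k → k < (L0 : Int) → firstAbsent pl ql k = none := by
        intro k h1 h2
        have hk : k = ((k.toNat : ℕ) : Int) := by omega
        by_contra h
        rw [hk] at h
        exact Nat.find_min hex (m := k.toNat) (by omega) ⟨by omega, by omega, h⟩
      have hAmin := pv_findSome?_pyRange_min
        (fun i => (PySem.List.pyRange 0 ((pl.length : Int) - i) 1).findSome? (fun j =>
            if PySem.Chars.isIn (PySem.List.slice pl (some j) (some (j + i + 1))) ql then none
            else some (PySem.List.slice pl (some j) (some (j + i + 1)))))
        0 m ((L0 : Int) - 1) (by omega) (by omega)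
        (fun i h1 h2 => by
          simp only
          rw [pv_bridge pl ql i h1]
          exact hminInt (i + 1) (by omega) (by omega))
        (by
          simp only
          rw [pv_bridge pl ql _ (by omega)]
          have h11 : (L0 : Int) - 1 + 1 = (L0 : Int) := by ring
          rw [h11]
          exact hL0s)
      rw [hAmin]
      simp only
      rw [pv_bridge pl ql _ (by omega)]
      have h11 : (L0 : Int) - 1 + 1 = (L0 : Int) := by ring
      rw [h11]
      have hg := pv_gallop_spec pl ql m.toNat 1 1 le_rfl le_rfl hmpos
        (fun k h1 h2 => absurd (lt_of_lt_of_le h2 h1) (by omega)) (by omega)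
      rw [← hm] at hg
      obtain ⟨g1, g2, g3, g4, g5⟩ := hg
      have hr2 : firstAbsent pl ql (gallop pl ql m m.toNat (1, 1)).2 ≠ none := by
        intro hnone
        have hr2m : (gallop pl ql m m.toNat (1, 1)).2 = m := by
          have : ¬ (gallop pl ql m m.toNat (1, 1)).2 < m := fun h => g5 ⟨h, hnone⟩
          omega
        have hmono := pv_mono_ge_int pl ql (L0 : Int) m (by omega) hL0m (by omega) hL0s
        rw [hr2m] at hnone
        exact hmono hnone
      rw [if_neg hr2]
      have hbs := pv_bsearch_spec pl ql (L0 : Int) (by omega) hL0s hminInt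
        ((gallop pl ql m m.toNat (1, 1)).2 - (gallop pl ql m m.toNat (1, 1)).1).toNat
        (gallop pl ql m m.toNat (1, 1)).1 (gallop pl ql m m.toNat (1, 1)).2
        g1 g2 (by omega) le_rfl
        (by
          by_contra hgt
          exact hL0s (g4 (L0 : Int) (by omega) (by omega)))
        (by
          by_contra hlt
          exact hr2 (hminInt _ (by omega) (by omega)))
      rw [hbs]
    · -- no non-shared substring: both sides return none
      have hall : ∀ k : Int, 1 ≤ k → k ≤ m → firstAbsent pl ql k = none := by
        intro k h1 h2
        by_contra h
        have hk : k = ((k.toNat : ℕ) : Int) := by omega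
        rw [hk] at h h2
        exact hex ⟨k.toNat, by omega, h2, h⟩
      have hA : (PySem.List.pyRange 0 m 1).findSome? (fun i =>
          (PySem.List.pyRange 0 ((pl.length : Int) - i) 1).findSome? (fun j =>
            if PySem.Chars.isIn (PySem.List.slice pl (some j) (some (j + i + 1))) ql then none
            else some (PySem.List.slice pl (some j) (some (j + i + 1))))) = none := by
        rw [List.findSome?_eq_none_iff]
        intro i hi
        rw [PySem.List.mem_pyRange_one] at hi
        rw [pv_bridge pl ql i hi.1]
        exact hall (i + 1) (by omega) (by omega)
      rw [hA]
      have hg := pv_gallop_spec pl ql m.toNat 1 1 le_rfl le_rfl hmpos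
        (fun k h1 h2 => absurd (lt_of_lt_of_le h2 h1) (by omega)) (by omega)
      rw [← hm] at hg
      obtain ⟨g1, g2, g3, g4, g5⟩ := hg
      rw [if_pos (hall _ (by omega) g3)]
      simp

-- ===== VERDICT (by name: the statement is the Claim_ definition above) =====
theorem solve_spec : Claim_equal_solve := by
  intro p q _
  unfold Spec_solve
  exact pv_main p q
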